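-- pv_equiv track=rewrite | github.com/tonielee31-ai/voynich-manuscript-ai-decoder | definitive-decoder.py | detect_currier
-- ===== SOURCE A (Python) =====
-- EVA_MULTI = ['cth', 'cph', 'cfh', 'ckh', 'sh', 'ch', 'qo']
--
-- def tokenize(word):
--     """Tokenize EVA word with multi-char tokens."""
--     tokens = []
--     i = 0
--     clean = ''.join(c for c in word if c.isalpha() or c in '!*-=')
--     while i < len(clean):
--         matched = False
--         for t in sorted(EVA_MULTI, key=len, reverse=True):
--             if clean[i:i+len(t)] == t:
--                 tokens.append(t)
--                 i += len(t)
--                 matched = True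
--                 break
--         if not matched:
--             if i < len(clean) and clean[i].isalpha():
--                 tokens.append(clean[i])
--             i += 1
--     return tokens
--
-- def detect_currier(lines):
--     """Detect Currier language for each line."""
--     results = []
--     for line in lines:
--         words = line.split()
--         edy = sum(1 for w in words if tokenize(w)[-3:] == ['e', 'd', 'y'])
--         iin = sum(1 for w in words if tokenize(w)[-3:] == ['i', 'i', 'n'])
--         total = len(words)
--         if total > 0:
--             if edy / total > iin / total * 1.5:
--                 lang = 'A'
--             elif iin / total > edy / total * 1.5:
--                 lang = 'B'
--             else:
--                 lang = 'M'
--         else: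
--             lang = 'M'
--         results.append(lang)
--     return results
-- ===== SOURCE B (Python) =====
-- def _label(edy, iin, total):
--     """Currier label from the two counts, guard-first."""
--     if total == 0:
--         return 'M'
--     if edy / total > iin / total * 1.5:
--         return 'A'
--     if iin / total > edy / total * 1.5:
--         return 'B'
--     return 'M'
--
-- def _classify(line):
--     words = line.split()
--     edy = iin = 0
--     for w in words:
--         # last up-to-3 alphabetic chars of w, collected back-to-front with early exit
--         tail = []
--         for c in reversed(w):
--             if c.isalpha():
--                 tail.append(c)
--                 if len(tail) == 3:
--                     break
--         if tail == ['y', 'd', 'e']: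
--             edy += 1
--         elif tail == ['n', 'i', 'i']:
--             iin += 1
--     return _label(edy, iin, len(words))
--
-- def detect_currier(lines):
--     """Detect Currier language for each line."""
--     return [_classify(line) for line in lines]
-- ===== Notes on version B (the rewrite author's own statement) =====
-- stated objective: simpler
-- what changed: B drops A's multi-character EVA tokenizer entirely (the letters e,d,y,i,n occur in no multi-character token, so a word's last three tokens spell edy/iin exactly when its last three alphabetic characters do); per word it scans the characters back-to-front collecting at most three alphabetic ones with an early exit, counts both suffixes in one pass over the words instead of two, and keeps the identical float ratio comparison.
import Mathlib
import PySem

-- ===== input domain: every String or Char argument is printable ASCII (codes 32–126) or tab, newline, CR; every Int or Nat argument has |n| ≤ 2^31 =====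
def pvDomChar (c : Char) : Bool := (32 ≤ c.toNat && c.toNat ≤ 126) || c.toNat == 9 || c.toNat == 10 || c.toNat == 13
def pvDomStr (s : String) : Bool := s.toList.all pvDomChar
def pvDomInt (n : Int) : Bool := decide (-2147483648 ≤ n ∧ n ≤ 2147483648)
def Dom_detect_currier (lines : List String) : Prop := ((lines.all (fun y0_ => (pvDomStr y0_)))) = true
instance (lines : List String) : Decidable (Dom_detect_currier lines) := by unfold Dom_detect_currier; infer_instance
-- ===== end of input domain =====

-- B replaces A's multi-character EVA tokenizer by a reversed early-exit scan that
-- collects a word's last (at most) three alphabetic characters, and counts both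
-- suffixes in a single fold over the words (valid because 'e','d','y','i','n' occur
-- in no multi-character token); the float ratio comparison (modelled exactly,
-- including CPython double rounding) is unchanged.  Objective: simpler.


-- ===== SHARED FLOAT PRIMITIVES =====
-- Exact integer model of CPython's IEEE-754 double arithmetic as used by BOTH
-- Pythons in the identical expression `edy/total > iin/total*1.5`:
-- a non-negative finite double is (m, e) with value m * 2^e, m = 0 or 2^52 ≤ m < 2^53.
-- Division of ints and multiplication by 1.5 are correctly rounded (round-half-even),
-- exactly as CPython performs them (no subnormals/overflow arise: all values here
-- lie in [2^-1100, 2]).  Both ports call these as their float operators.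

def pvBitLen (n : Nat) : Nat := PySem.Int.bitLength (n : Int)

-- round q * 2^e (plus a sticky tail below the last bit) to 53 significant bits, half-even
def pvRoundMant (q : Nat) (sticky : Bool) (e : Int) : Nat × Int :=
  let L := pvBitLen q
  if L ≤ 53 then (q, e) else
  let d := L - 53
  let m0 := q >>> d
  let rem := q % 2 ^ d
  let m1 := if 2 * rem > 2 ^ d || (2 * rem == 2 ^ d && (sticky || m0 % 2 == 1)) then m0 + 1 else m0
  if m1 == 2 ^ 53 then (2 ^ 52, e + (d : Int) + 1) else (m1, e + (d : Int))

-- float(a) / float(b) for Python ints a ≥ 0, b > 0 (correctly rounded true division)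
def pvFlDiv (a b : Nat) : Nat × Int :=
  if a == 0 then (0, 0) else
  let s : Int := 54 + (pvBitLen b : Int) - (pvBitLen a : Int)
  let n := if 0 ≤ s then a <<< s.toNat else a
  let den := if 0 ≤ s then b else b <<< (-s).toNat
  pvRoundMant (n / den) (decide (n % den ≠ 0)) (-s)

-- x * 1.5 (1.5 = 3/2 is exact; one correctly rounded multiplication)
def pvFlMul15 (x : Nat × Int) : Nat × Int :=
  if x.1 == 0 then (0, 0) else pvRoundMant (3 * x.1) false (x.2 - 1)

-- x > z on non-negative normalized doubles
def pvFlGt (x z : Nat × Int) : Bool :=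
  if x.1 == 0 then false
  else if z.1 == 0 then true
  else if x.2 != z.2 then x.2 > z.2
  else x.1 > z.1

-- ===== PORT A =====

def pvEvaMulti : List (List Char) :=
  [['c','t','h'], ['c','p','h'], ['c','f','h'], ['c','k','h'], ['s','h'], ['c','h'], ['q','o']]

-- sorted(EVA_MULTI, key=len, reverse=True); A recomputes it each loop iteration,
-- it is constant, so the port names it once
def pvSortedMulti : List (List Char) := PySem.List.sorted pvEvaMulti (fun t => t.length) true

-- the inner `for t in …: if clean[i:i+len(t)] == t: … break` (slice with non-negative
-- bounds = take of the drop)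
def pvTryMulti : List (List Char) → List Char → Option (List Char)
  | [], _ => none
  | t :: rest, cl => if cl.take t.length = t then some t else pvTryMulti rest cl

-- the while loop over clean, recursing on the untreated suffix; i += len(t) is
-- dropping len(t) chars, i.e. (len(t) - 1) past the head (every multi is nonempty)
def pvTokLoop (cl : List Char) : List (List Char) :=
  match cl with
  | [] => []
  | c :: rest =>
    match pvTryMulti pvSortedMulti (c :: rest) with
    | some t => t :: pvTokLoop (rest.drop (t.length - 1))
    | none => if PySem.Chars.isalpha c then [c] :: pvTokLoop rest else pvTokLoop rest
termination_by cl.length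
decreasing_by all_goals simp [List.length_drop]

-- c.isalpha() or c in '!*-='
def pvKeep (c : Char) : Bool :=
  PySem.Chars.isalpha c || (c == '!' || c == '*' || c == '-' || c == '=')

def pvTokenize (w : List Char) : List (List Char) := pvTokLoop (w.filter pvKeep)

def detect_currier (lines : List String) : List String :=
  lines.foldl (fun results line =>
    let words := PySem.Str.split₀ line
    let edy := words.countP (fun w =>
      PySem.List.slice (pvTokenize w.toList) (some (-3)) none == [['e'], ['d'], ['y']])
    let iin := words.countP (fun w =>
      PySem.List.slice (pvTokenize w.toList) (some (-3)) none == [['i'], ['i'], ['n']])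
    let total := words.length
    let lang :=
      if total > 0 then
        if pvFlGt (pvFlDiv edy total) (pvFlMul15 (pvFlDiv iin total)) then "A"
        else if pvFlGt (pvFlDiv iin total) (pvFlMul15 (pvFlDiv edy total)) then "B"
        else "M"
      else "M"
    results ++ [lang]) []

-- ===== PORT B =====

-- the inner `for c in reversed(w): if c.isalpha(): tail.append(c); if len(tail)==3: break`
def pvSuf3 : List Char → List Char → List Char
  | [], tail => tail
  | c :: rest, tail =>
    if PySem.Chars.isalpha c then
      if (tail ++ [c]).length == 3 then tail ++ [c] else pvSuf3 rest (tail ++ [c])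
    else pvSuf3 rest tail

-- _label(edy, iin, total): guard-first classification
def pvLabel (edy iin total : Nat) : String :=
  if total == 0 then "M"
  else if pvFlGt (pvFlDiv edy total) (pvFlMul15 (pvFlDiv iin total)) then "A"
  else if pvFlGt (pvFlDiv iin total) (pvFlMul15 (pvFlDiv edy total)) then "B"
  else "M"

-- _classify(line): one fold over the words accumulating the (edy, iin) pair
def pvClassify (line : String) : String :=
  let words := PySem.Str.split₀ line
  let ei := words.foldl (fun ei w =>
    let tail := pvSuf3 w.toList.reverse []
    if tail == ['y', 'd', 'e'] then (ei.1 + 1, ei.2)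
    else if tail == ['n', 'i', 'i'] then (ei.1, ei.2 + 1)
    else ei) ((0 : Nat), (0 : Nat))
  pvLabel ei.1 ei.2 words.length

def detect_currier_alt (lines : List String) : List String := lines.map pvClassify

-- ===== PRECONDITION & SPEC =====
def Spec_detect_currier (lines : List String) (out : List String) : Prop := out = detect_currier_alt lines
instance (lines : List String) (out : List String) : Decidable (Spec_detect_currier lines out) := by unfold Spec_detect_currier; infer_instance

-- ===== CLAIM (what is proved, stated in full; the proofs are below) =====
def Claim_equal_detect_currier : Prop := ∀ (lines : List String), Dom_detect_currier lines → Spec_detect_currier lines (detect_currier lines)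

-- ===== LEMMAS AND PROOFS =====

-- the stable sort by descending length leaves the literal list unchanged
set_option maxRecDepth 100000 in
theorem pvSortedMulti_eq : pvSortedMulti = pvEvaMulti := by decide

theorem pvTryMulti_some {ms : List (List Char)} {cl t : List Char}
    (h : pvTryMulti ms cl = some t) : t ∈ ms ∧ cl.take t.length = t := by
  induction ms with
  | nil => simp [pvTryMulti] at h
  | cons m rest ih =>
    by_cases hm : cl.take m.length = m
    · simp [pvTryMulti, hm] at h; subst h; exact ⟨List.mem_cons_self, hm⟩
    · simp [pvTryMulti, hm] at h
      obtain ⟨h1, h2⟩ := ih h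
      exact ⟨List.mem_cons_of_mem _ h1, h2⟩

theorem pvMulti_len {t : List Char} (h : t ∈ pvSortedMulti) : 2 ≤ t.length := by
  rw [pvSortedMulti_eq] at h; fin_cases h <;> decide

theorem pvMulti_alpha {t : List Char} (h : t ∈ pvSortedMulti) :
    ∀ c ∈ t, PySem.Chars.isalpha c = true := by
  rw [pvSortedMulti_eq] at h
  fin_cases h <;> (intro c hc; fin_cases hc <;> decide)

-- tokens concatenate to exactly the alphabetic characters of the input
theorem len_le_flatten {α : Type} (ts : List (List α)) (h : ∀ x ∈ ts, x ≠ []) :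
    ts.length ≤ ts.flatten.length := by
  induction ts with
  | nil => simp
  | cons x rest ih =>
    have hx : x ≠ [] := h x List.mem_cons_self
    have : 1 ≤ x.length := by cases x; simp at hx; simp
    simp only [List.flatten_cons, List.length_append, List.length_cons]
    have := ih (fun y hy => h y (List.mem_cons_of_mem _ hy))
    omega

theorem pvTokLoop_flatten (cl : List Char) :
    (pvTokLoop cl).flatten = cl.filter PySem.Chars.isalpha := by
  induction cl using pvTokLoop.induct with
  | case1 => simp [pvTokLoop]
  | case2 c rest t ht ih =>
    obtain ⟨hmem, htake⟩ := pvTryMulti_some ht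
    have hlen := pvMulti_len hmem
    have hsplit : c :: rest = t ++ rest.drop (t.length - 1) := by
      conv_lhs => rw [← List.take_append_drop t.length (c :: rest)]
      rw [htake]
      congr 1
      cases t with
      | nil => simp at hlen
      | cons x xs => simp
    rw [pvTokLoop, ht]
    have halpha : t.filter PySem.Chars.isalpha = t :=
      List.filter_eq_self.mpr (pvMulti_alpha hmem)
    conv_rhs => rw [hsplit]
    rw [List.filter_append, halpha]
    simpa using ih
  | case3 c rest hnone halpha ih =>
    rw [pvTokLoop, hnone]
    simp [halpha, ih]
  | case4 c rest hnone halpha ih =>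
    rw [pvTokLoop, hnone]
    simp [halpha, ih]

theorem pvTokLoop_nonempty (cl : List Char) : ∀ tok ∈ pvTokLoop cl, tok ≠ [] := by
  induction cl using pvTokLoop.induct with
  | case1 => simp [pvTokLoop]
  | case2 c rest t ht ih =>
    obtain ⟨hmem, _⟩ := pvTryMulti_some ht
    have hlen := pvMulti_len hmem
    rw [pvTokLoop, ht]
    intro tok htok
    rcases List.mem_cons.mp htok with h | h
    · subst h; intro hnil; rw [hnil] at hlen; simp at hlen
    · exact ih tok h
  | case3 c rest hnone halpha ih =>
    rw [pvTokLoop, hnone]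
    intro tok htok
    simp only [halpha, if_true] at htok
    rcases List.mem_cons.mp htok with h | h
    · subst h; simp
    · exact ih tok h
  | case4 c rest hnone halpha ih =>
    rw [pvTokLoop, hnone]
    simpa [halpha] using ih

theorem pvTokLoop_shape (cl : List Char) :
    ∀ tok ∈ pvTokLoop cl, tok ∈ pvSortedMulti ∨ ∃ ch, tok = [ch] := by
  induction cl using pvTokLoop.induct with
  | case1 => simp [pvTokLoop]
  | case2 c rest t ht ih =>
    obtain ⟨hmem, _⟩ := pvTryMulti_some ht
    rw [pvTokLoop, ht]
    intro tok htok
    rcases List.mem_cons.mp htok with h | h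
    · subst h; exact Or.inl hmem
    · exact ih tok h
  | case3 c rest hnone halpha ih =>
    rw [pvTokLoop, hnone]
    intro tok htok
    simp only [halpha, if_true] at htok
    rcases List.mem_cons.mp htok with h | h
    · subst h; exact Or.inr ⟨c, rfl⟩
    · exact ih tok h
  | case4 c rest hnone halpha ih =>
    rw [pvTokLoop, hnone]
    simpa [halpha] using ih

theorem pvKey_bwd {a b c : Char} {cl : List Char}
    (habc : ∀ t ∈ pvSortedMulti, a ∉ t ∧ b ∉ t ∧ c ∉ t)
    (h : [a, b, c] <:+ cl.filter PySem.Chars.isalpha) :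
    [[a], [b], [c]] <:+ pvTokLoop cl := by
  induction cl using pvTokLoop.induct with
  | case1 => simp at h
  | case2 c0 rest t ht ih =>
    obtain ⟨hmem, htake⟩ := pvTryMulti_some ht
    have hlen := pvMulti_len hmem
    have hsplit : c0 :: rest = t ++ rest.drop (t.length - 1) := by
      conv_lhs => rw [← List.take_append_drop t.length (c0 :: rest)]
      rw [htake]
      congr 1
      cases t with
      | nil => simp at hlen
      | cons x xs => simp
    have halpha : t.filter PySem.Chars.isalpha = t :=
      List.filter_eq_self.mpr (pvMulti_alpha hmem)
    rw [hsplit, List.filter_append, halpha] at h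
    rw [pvTokLoop, ht]
    set fr := (rest.drop (t.length - 1)).filter PySem.Chars.isalpha with hfr_def
    obtain ⟨u, hu⟩ := h
    by_cases hfr : 3 ≤ fr.length
    · have hul : u.length + 3 = t.length + fr.length := by
        have := congrArg List.length hu; simpa using this
      have hge : t.length ≤ u.length := by omega
      have hsfx : [a, b, c] <:+ fr := by
        refine ⟨u.drop t.length, ?_⟩
        have := congrArg (List.drop t.length) hu
        rwa [List.drop_append_of_le_length hge, List.drop_left] at this
      exact (ih hsfx).trans (List.suffix_cons _ _)
    · exfalso
      have hul : u.length + 3 = t.length + fr.length := by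
        have := congrArg List.length hu; simpa using this
      have hlt : u.length < t.length := by omega
      have ha_mem : a ∈ t := by
        have h1 : (u ++ [a, b, c])[u.length]? = some a := by simp
        rw [hu] at h1
        rw [List.getElem?_append_left hlt] at h1
        exact List.mem_of_getElem? h1
      exact (habc t hmem).1 ha_mem
  | case3 c0 rest hnone hal ih =>
    rw [pvTokLoop, hnone]
    simp only [hal, if_true]
    rw [List.filter_cons_of_pos hal] at h
    obtain ⟨u, hu⟩ := h
    by_cases hfr : 3 ≤ (rest.filter PySem.Chars.isalpha).length
    · have hul : u.length + 3 = 1 + (rest.filter PySem.Chars.isalpha).length := by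
        have := congrArg List.length hu; simp at this; omega
      have hsfx : [a, b, c] <:+ rest.filter PySem.Chars.isalpha := by
        refine ⟨u.drop 1, ?_⟩
        have := congrArg (List.drop 1) hu
        rw [List.drop_append_of_le_length (by omega)] at this
        simpa [List.drop_one] using this
      exact (ih hsfx).trans (List.suffix_cons _ _)
    · have hul : u.length + 3 = 1 + (rest.filter PySem.Chars.isalpha).length := by
        have := congrArg List.length hu; simp at this; omega
      have hu0 : u = [] := by
        have : u.length = 0 := by omega
        exact List.eq_nil_of_length_eq_zero this
      subst hu0
      simp only [List.nil_append] at hu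
      obtain ⟨hca, hfrbc⟩ : c0 = a ∧ rest.filter PySem.Chars.isalpha = [b, c] :=
        List.cons_eq_cons.mp hu.symm
      have hfl : (pvTokLoop rest).flatten = [b, c] := (pvTokLoop_flatten rest).trans hfrbc
      have hne := pvTokLoop_nonempty rest
      have hshape := pvTokLoop_shape rest
      have hts : pvTokLoop rest = [[b], [c]] := by
        rcases hts' : pvTokLoop rest with _ | ⟨x, ts1⟩
        · rw [hts'] at hfl; simp at hfl
        rcases ts1 with _ | ⟨y, ts2⟩
        · rw [hts'] at hfl hshape
          simp only [List.flatten_cons, List.flatten_nil, List.append_nil] at hfl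
          rcases hshape x List.mem_cons_self with hm | ⟨ch, hch⟩
          · exact absurd (hfl ▸ List.mem_cons_self) ((habc x hm).2.1)
          · rw [hch] at hfl; simp at hfl
        rcases ts2 with _ | ⟨z, ts3⟩
        · rw [hts'] at hfl hne
          have hxne := hne x (by simp)
          have hyne := hne y (by simp)
          have hlsum : x.length + y.length = 2 := by
            have := congrArg List.length hfl; simp at this; omega
          have hx1 : x.length = 1 := by
            have h1 : 1 ≤ x.length := List.length_pos_iff.mpr hxne
            have h2 : 1 ≤ y.length := List.length_pos_iff.mpr hyne
            omega
          have hy1 : y.length = 1 := by omega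
          obtain ⟨xc, hxc⟩ := List.length_eq_one_iff.mp hx1
          obtain ⟨yc, hyc⟩ := List.length_eq_one_iff.mp hy1
          subst hxc; subst hyc
          simp only [List.flatten_cons, List.flatten_nil, List.append_nil,
            List.cons_append, List.nil_append] at hfl
          obtain ⟨hb, hc⟩ := List.cons_eq_cons.mp hfl
          obtain ⟨hc2, -⟩ := List.cons_eq_cons.mp hc
          rw [hb, hc2]
        · exfalso
          rw [hts'] at hfl hne
          have := len_le_flatten _ hne
          rw [hfl] at this
          have hzne := hne z (by simp)
          have hxne := hne x (by simp)
          have hyne := hne y (by simp)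
          simp only [List.length_cons, List.length_nil] at this ⊢
          omega
      rw [hts, hca]
  | case4 c0 rest hnone hal ih =>
    rw [pvTokLoop, hnone]
    simp only [hal, if_false, Bool.false_eq_true]
    rw [List.filter_cons_of_neg (by simp [hal])] at h
    exact ih h

theorem pvKey_fwd {a b c : Char} {cl : List Char}
    (h : [[a], [b], [c]] <:+ pvTokLoop cl) :
    [a, b, c] <:+ cl.filter PySem.Chars.isalpha := by
  obtain ⟨u, hu⟩ := h
  have hfl := pvTokLoop_flatten cl
  rw [← hu] at hfl
  exact ⟨u.flatten, by simpa using hfl⟩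

theorem pvFilter_filter (w : List Char) :
    (w.filter pvKeep).filter PySem.Chars.isalpha = w.filter PySem.Chars.isalpha := by
  rw [List.filter_filter]
  apply List.filter_congr
  intro c _
  cases hc : PySem.Chars.isalpha c <;> simp [pvKeep, hc]

theorem pvWord_eq {a b c : Char}
    (habc : ∀ t ∈ pvSortedMulti, a ∉ t ∧ b ∉ t ∧ c ∉ t) (w : List Char) :
    (PySem.List.slice (pvTokenize w) (some (-3)) none == [[a], [b], [c]]) =
      PySem.Chars.endswith (w.filter PySem.Chars.isalpha) [a, b, c] := by
  rw [PySem.List.slice_from_neg_ofNat _ 3 (by omega)]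
  rw [Bool.eq_iff_iff]
  rw [beq_iff_eq, PySem.Chars.endswith_iff]
  unfold pvTokenize
  constructor
  · intro heq
    have hsfx : [[a], [b], [c]] <:+ pvTokLoop (w.filter pvKeep) := by
      rw [← heq]; exact List.drop_suffix _ _
    have := pvKey_fwd hsfx
    rwa [pvFilter_filter] at this
  · intro hsfx
    rw [← pvFilter_filter] at hsfx
    obtain ⟨u, hu⟩ := pvKey_bwd habc hsfx
    rw [← hu]
    have hl : (u ++ [[a], [b], [c]]).length - 3 = u.length := by simp
    rw [hl, List.drop_left]

theorem pvHabc_edy : ∀ t ∈ pvSortedMulti, 'e' ∉ t ∧ 'd' ∉ t ∧ 'y' ∉ t := by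
  intro t ht; rw [pvSortedMulti_eq] at ht; fin_cases ht <;> exact ⟨by decide, by decide, by decide⟩

theorem pvHabc_iin : ∀ t ∈ pvSortedMulti, 'i' ∉ t ∧ 'i' ∉ t ∧ 'n' ∉ t := by
  intro t ht; rw [pvSortedMulti_eq] at ht; fin_cases ht <;> exact ⟨by decide, by decide, by decide⟩

-- B's reversed early-exit scan collects the first 3 alphabetic chars of its input
theorem pvSuf3_eq (l : List Char) : ∀ (tail : List Char), tail.length < 3 →
    pvSuf3 l tail = tail ++ (l.filter PySem.Chars.isalpha).take (3 - tail.length) := by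
  induction l with
  | nil => intro tail _; simp [pvSuf3]
  | cons c rest ih =>
    intro tail htl
    by_cases hc : PySem.Chars.isalpha c = true
    · rw [pvSuf3, if_pos hc, List.filter_cons_of_pos hc]
      by_cases h3 : (tail ++ [c]).length = 3
      · rw [if_pos (by simpa using h3)]
        have h2 : tail.length = 2 := by simp at h3; omega
        simp [h2]
      · rw [if_neg (by simpa using h3)]
        have hlen : (tail ++ [c]).length < 3 := by simp at h3 ⊢; omega
        rw [ih _ hlen]
        have hs : 3 - tail.length = (3 - (tail ++ [c]).length) + 1 := by simp; omega
        rw [hs, List.take_succ_cons, List.append_assoc]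
        simp
    · rw [pvSuf3, if_neg hc, List.filter_cons_of_neg (by simpa using hc)]
      exact ih tail htl

-- the suffix test on the reversed scan equals endswith on the alpha-filtered word
theorem pvSuf3_cond (w : List Char) (a b c : Char) :
    (pvSuf3 w.reverse [] == [c, b, a]) =
      PySem.Chars.endswith (w.filter PySem.Chars.isalpha) [a, b, c] := by
  rw [pvSuf3_eq w.reverse [] (by simp)]
  simp only [List.nil_append, List.length_nil, Nat.sub_zero]
  rw [Bool.eq_iff_iff, beq_iff_eq, PySem.Chars.endswith_iff]
  have hfr : w.reverse.filter PySem.Chars.isalpha = (w.filter PySem.Chars.isalpha).reverse := by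
    simp
  rw [hfr]
  constructor
  · intro h
    have hp : [a, b, c].reverse <+: (w.filter PySem.Chars.isalpha).reverse := by
      have := List.take_prefix 3 (w.filter PySem.Chars.isalpha).reverse
      rw [h] at this
      simpa using this
    exact List.reverse_prefix.mp hp
  · intro h
    have hp : [a, b, c].reverse <+: (w.filter PySem.Chars.isalpha).reverse :=
      List.reverse_prefix.mpr h
    have := List.prefix_iff_eq_take.mp hp
    simpa using this.symm

-- the single fold over the words is the pair of the two counts
theorem pvFold_counts (words : List String) : ∀ (e i : Nat),
    words.foldl (fun ei w =>
      let tail := pvSuf3 w.toList.reverse []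
      if tail == ['y', 'd', 'e'] then (ei.1 + 1, ei.2)
      else if tail == ['n', 'i', 'i'] then (ei.1, ei.2 + 1)
      else ei) (e, i)
    = (e + words.countP (fun w => pvSuf3 w.toList.reverse [] == ['y', 'd', 'e']),
       i + words.countP (fun w => pvSuf3 w.toList.reverse [] == ['n', 'i', 'i'])) := by
  induction words with
  | nil => intro e i; simp
  | cons w ws ih =>
    intro e i
    simp only [List.foldl_cons, List.countP_cons]
    by_cases h1 : (pvSuf3 w.toList.reverse [] == ['y', 'd', 'e']) = true
    · have h2 : (pvSuf3 w.toList.reverse [] == ['n', 'i', 'i']) = false := by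
        rw [beq_iff_eq] at h1
        rw [h1]; decide
      simp only [h1, h2, if_true, ih]
      exact Prod.ext (by simp; try omega) (by simp; try omega)
    · by_cases h2 : (pvSuf3 w.toList.reverse [] == ['n', 'i', 'i']) = true
      · simp only [h1, h2, Bool.false_eq_true, if_false, if_true, ih]
        exact Prod.ext (by simp; try omega) (by simp; try omega)
      · simp only [h1, h2, Bool.false_eq_true, if_false, ih]
        simp

theorem pvLine_eq (line : String) :
    (let words := PySem.Str.split₀ line
     let edy := words.countP (fun w =>
       PySem.List.slice (pvTokenize w.toList) (some (-3)) none == [['e'], ['d'], ['y']])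
     let iin := words.countP (fun w =>
       PySem.List.slice (pvTokenize w.toList) (some (-3)) none == [['i'], ['i'], ['n']])
     let total := words.length
     if total > 0 then
       if pvFlGt (pvFlDiv edy total) (pvFlMul15 (pvFlDiv iin total)) then "A"
       else if pvFlGt (pvFlDiv iin total) (pvFlMul15 (pvFlDiv edy total)) then "B"
       else "M"
     else "M") = pvClassify line := by
  have he : (fun (w : String) => PySem.List.slice (pvTokenize w.toList) (some (-3)) none == [['e'], ['d'], ['y']]) =
      (fun (w : String) => pvSuf3 w.toList.reverse [] == ['y', 'd', 'e']) :=
    funext fun w => (pvWord_eq pvHabc_edy w.toList).trans (pvSuf3_cond w.toList 'e' 'd' 'y').symm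
  have hi : (fun (w : String) => PySem.List.slice (pvTokenize w.toList) (some (-3)) none == [['i'], ['i'], ['n']]) =
      (fun (w : String) => pvSuf3 w.toList.reverse [] == ['n', 'i', 'i']) :=
    funext fun w => (pvWord_eq pvHabc_iin w.toList).trans (pvSuf3_cond w.toList 'i' 'i' 'n').symm
  simp only [pvClassify, pvLabel, pvFold_counts, he, hi, Nat.zero_add]
  by_cases ht : (PySem.Str.split₀ line).length = 0
  · simp [ht]
  · simp only [Nat.pos_of_ne_zero ht, if_true, beq_iff_eq, ht, if_false]

-- ===== VERDICT (by name: the statement is the Claim_ definition above) =====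
theorem detect_currier_spec : Claim_equal_detect_currier := by
  intro lines _
  unfold Spec_detect_currier detect_currier detect_currier_alt
  rw [PySem.List.foldl_append_singleton_eq_map]
  exact List.map_congr_left (fun line _ => pvLine_eq line)
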